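-- pv_equiv track=rewrite | github.com/SegataLab/metaclock | ColSampler.py | consensus_col_builder
-- ===== SOURCE A (Python) =====
-- def check_max_uniq(site_lst):
-- 	"""
-- 	This process could be paralleled
-- 	"""
--
-- 	votes = {'A': 0, 'T': 0, 'G': 0, 'C': 0, '-': 0}
-- 	for s in site_lst:
-- 		votes[s] += 1
-- 	return max(votes, key=votes.get)
--
-- def consensus_col_builder(tuple_of_homo_cols):
-- 	# It calculates consensus column using majority rule
-- 	consensus_col = []
-- 	for taxa in range(len(tuple_of_homo_cols[0])):
-- 		site_lst = []
-- 		for col in range(len(tuple_of_homo_cols)):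
-- 			site_lst.append(tuple_of_homo_cols[col][taxa])
-- 		consensus_col.append(check_max_uniq(site_lst))
--
-- 	return ''.join(consensus_col)
-- ===== SOURCE B (Python) =====
-- def consensus_col_builder(tuple_of_homo_cols):
--     # Build the full per-taxon vote table in one column-major streaming pass,
--     # then extract the majority character per taxon.
--     width = len(tuple_of_homo_cols[0])
--     votes = [{'A': 0, 'T': 0, 'G': 0, 'C': 0, '-': 0} for _ in range(width)]
--     for col in tuple_of_homo_cols:
--         for taxa in range(width):
--             votes[taxa][col[taxa]] += 1
--     return ''.join(max(v, key=v.get) for v in votes)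
-- ===== Notes on version B (the rewrite author's own statement) =====
-- stated objective: alternative
-- what changed: B replaces A's per-taxon inner scan that rebuilds a site list and a fresh counter for every taxon by one column-major streaming pass that fills a whole per-taxon vote table, followed by a single majority-extraction pass; Pre_ excludes inputs (empty list, columns shorter than the first, characters outside ATGC-) on which A raises IndexError/KeyError.
import Mathlib
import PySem

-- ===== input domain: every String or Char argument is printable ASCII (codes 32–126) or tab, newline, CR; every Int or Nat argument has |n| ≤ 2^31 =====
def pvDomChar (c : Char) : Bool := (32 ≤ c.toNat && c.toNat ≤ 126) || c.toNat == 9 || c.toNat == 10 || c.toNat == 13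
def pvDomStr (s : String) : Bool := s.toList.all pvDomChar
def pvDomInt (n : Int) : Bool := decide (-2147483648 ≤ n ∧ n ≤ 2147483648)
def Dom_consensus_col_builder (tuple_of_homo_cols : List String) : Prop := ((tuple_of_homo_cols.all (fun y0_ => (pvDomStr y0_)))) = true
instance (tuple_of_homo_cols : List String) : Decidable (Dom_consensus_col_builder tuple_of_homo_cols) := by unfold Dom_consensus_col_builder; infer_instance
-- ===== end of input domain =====

-- B builds the whole per-taxon vote table in one column-major streaming pass and then
-- extracts the majority per taxon, instead of A's per-taxon rebuild of a site list and
-- a fresh counter; same cost, different decomposition ("alternative").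


-- ===== PORT A =====
-- votes[s] += 1 raises KeyError when s is not one of A/T/G/C/-; those inputs are outside
-- Pre_ (the port's Dict.modify is exact on Pre_).
def check_max_uniq (site_lst : List Char) : Char :=
  let votes :=
    site_lst.foldl (fun d s => d.modify s 0 (· + 1))
      (PySem.Dict.ofList [('A', (0 : Int)), ('T', 0), ('G', 0), ('C', 0), ('-', 0)])
  -- max(votes, key=votes.get): first key (in insertion order) with maximal count;
  -- the dict always has keys, so max? is some; .getD 'A' only makes the port total.
  (PySem.List.max? votes.keys (fun k => votes.getD k 0)).getD 'A'

-- tuple_of_homo_cols[0] raises IndexError on the empty list, and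
-- tuple_of_homo_cols[col][taxa] raises IndexError on columns shorter than the first:
-- both outside Pre_; the port's .getD fallbacks only make it total.
def consensus_col_builder (tuple_of_homo_cols : List String) : String :=
  String.ofList
    ((PySem.List.pyRange 0 (PySem.Str.len ((PySem.List.pyGet? tuple_of_homo_cols 0).getD ""))).foldl
      (fun acc taxa =>
        acc ++ [check_max_uniq
          ((PySem.List.pyRange 0 (tuple_of_homo_cols.length : Int)).foldl
            (fun sl col =>
              sl ++ [(((PySem.List.pyGet? tuple_of_homo_cols col).bind
                        (fun s => PySem.Str.pyGet? s taxa)).getD ' ')]) [])]) [])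

-- ===== PORT B =====
def consensus_col_builder_alt (tuple_of_homo_cols : List String) : String :=
  String.ofList
    ((tuple_of_homo_cols.foldl
        (fun vs col =>
          (PySem.List.pyRange 0 (PySem.Str.len ((PySem.List.pyGet? tuple_of_homo_cols 0).getD ""))).foldl
            (fun vs taxa =>
              vs.modify taxa.toNat
                (fun v => v.modify ((PySem.Str.pyGet? col taxa).getD ' ') 0 (· + 1))) vs)
        (List.replicate (PySem.Str.len ((PySem.List.pyGet? tuple_of_homo_cols 0).getD "")).toNat
          (PySem.Dict.ofList [('A', (0 : Int)), ('T', 0), ('G', 0), ('C', 0), ('-', 0)]))).map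
      (fun v => (PySem.List.max? v.keys (fun k => v.getD k 0)).getD 'A'))

-- ===== PRECONDITION & SPEC =====
-- Pre_ is exactly where Python A returns: a nonempty list, every column at least as long
-- as the first, and every character at a scanned position among A/T/G/C/- (otherwise A
-- raises IndexError resp. KeyError).
def Pre_consensus_col_builder (tuple_of_homo_cols : List String) : Prop :=
  (!tuple_of_homo_cols.isEmpty &&
    tuple_of_homo_cols.all (fun s =>
      decide ((tuple_of_homo_cols.headD "").toList.length ≤ s.toList.length) &&
      (s.toList.take (tuple_of_homo_cols.headD "").toList.length).all
        (fun c => c ∈ (['A', 'T', 'G', 'C', '-'] : List Char)))) = true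
instance (tuple_of_homo_cols : List String) : Decidable (Pre_consensus_col_builder tuple_of_homo_cols) := by
  unfold Pre_consensus_col_builder; infer_instance

def pvWitness_consensus_col_builder : List String := ["AT-", "GTC"]

def Spec_consensus_col_builder (tuple_of_homo_cols : List String) (out : String) : Prop := out = consensus_col_builder_alt tuple_of_homo_cols
instance (tuple_of_homo_cols : List String) (out : String) : Decidable (Spec_consensus_col_builder tuple_of_homo_cols out) := by unfold Spec_consensus_col_builder; infer_instance

-- ===== CLAIM (what is proved, stated in full; the proofs are below) =====
def Claim_equal_consensus_col_builder : Prop := ∀ (tuple_of_homo_cols : List String), Dom_consensus_col_builder tuple_of_homo_cols → Pre_consensus_col_builder tuple_of_homo_cols → Spec_consensus_col_builder tuple_of_homo_cols (consensus_col_builder tuple_of_homo_cols)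

-- ===== LEMMAS AND PROOFS =====

-- the character both ports read at column s, row i (with the shared ' ' totality default)
def pvCharAt (s : String) (i : Nat) : Char := (s.toList[i]?).getD ' '

def pvUpd (c : Char) (d : PySem.Dict Char Int) : PySem.Dict Char Int := d.modify c 0 (· + 1)

def pvDict0 : PySem.Dict Char Int :=
  PySem.Dict.ofList [('A', 0), ('T', 0), ('G', 0), ('C', 0), ('-', 0)]

-- width used by both ports, as a Nat
def pvW (t : List String) : Nat := (((PySem.List.pyGet? t 0).getD "").toList.length)

-- count dict for row i after scanning all columns
def pvRowDict (t : List String) (i : Nat) : PySem.Dict Char Int :=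
  t.foldl (fun d col => pvUpd (pvCharAt col i) d) pvDict0

-- A's inner loop builds exactly the row-i characters
theorem pvSite_eq (t : List String) (i : Nat) :
    (PySem.List.pyRange 0 (t.length : Int)).foldl
      (fun sl col =>
        sl ++ [(((PySem.List.pyGet? t col).bind (fun s => PySem.Str.pyGet? s (i : Int))).getD ' ')]) []
    = t.map (fun s => pvCharAt s i) := by
  rw [PySem.List.foldl_append_singleton_eq_map, PySem.List.pyRange_zero_natCast, List.map_map]
  simp only [List.nil_append]
  apply List.ext_getElem?
  intro j
  by_cases hj : j < t.length
  · simp [Function.comp, PySem.List.pyGet?_natCast, hj, pvCharAt]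
  · simp [hj]

-- one inner pass of B, viewed pointwise
theorem pvInner_getElem? (w : Nat) (f : Int → PySem.Dict Char Int → PySem.Dict Char Int)
    (vs : List (PySem.Dict Char Int)) (i : Nat) :
    ((PySem.List.pyRange 0 (w : Int)).foldl
        (fun vs taxa => vs.modify taxa.toNat (f taxa)) vs)[i]?
    = if i < w then (vs[i]?).map (f (i : Int)) else vs[i]? := by
  induction w generalizing vs with
  | zero => simp [PySem.List.pyRange]
  | succ n ih =>
    rw [show ((n + 1 : Nat) : Int) = (n : Int) + 1 by push_cast; ring,
      PySem.List.pyRange_one_succ_right (by positivity), List.foldl_append]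
    simp only [List.foldl_cons, List.foldl_nil, ih, List.getElem?_modify, Int.toNat_natCast]
    by_cases h1 : i < n
    · simp only [if_pos h1, if_pos (show i < n + 1 by omega)]
      cases vs[i]? <;> simp [show ¬ n = i by omega]
    · by_cases h2 : i = n
      · subst h2
        simp only [if_neg h1, if_pos (show i < i + 1 by omega)]
        cases vs[i]? <;> simp
      · simp only [if_neg h1, if_neg (show ¬ i < n + 1 by omega)]
        cases vs[i]? <;> simp [show ¬ n = i by omega]

-- B's full double loop, viewed pointwise: row i holds the fold of its own characters
theorem pvOuter_getElem? (w : Nat) (cols : List String)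
    (vs : List (PySem.Dict Char Int)) (i : Nat) :
    (cols.foldl
        (fun vs col =>
          (PySem.List.pyRange 0 (w : Int)).foldl
            (fun vs taxa =>
              vs.modify taxa.toNat
                (fun v => v.modify ((PySem.Str.pyGet? col taxa).getD ' ') 0 (· + 1))) vs)
        vs)[i]?
    = if i < w then (vs[i]?).map (fun d => cols.foldl (fun d col => pvUpd (pvCharAt col i) d) d)
      else vs[i]? := by
  induction cols generalizing vs with
  | nil => by_cases h : i < w <;> simp [h]
  | cons c cs ih =>
    rw [List.foldl_cons, ih]
    by_cases h : i < w
    · rw [if_pos h, if_pos h,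
        pvInner_getElem? w (fun taxa v => v.modify ((PySem.Str.pyGet? c taxa).getD ' ') 0 (· + 1)) vs i,
        if_pos h]
      cases hv : vs[i]? with
      | none => rfl
      | some d => simp [pvUpd, pvCharAt]
    · rw [if_neg h, if_neg h,
        pvInner_getElem? w (fun taxa v => v.modify ((PySem.Str.pyGet? c taxa).getD ' ') 0 (· + 1)) vs i,
        if_neg h]

-- the two ports are in fact equal on every input (Pre_ only marks where Python A returns)
theorem pvPorts_eq (t : List String) :
    consensus_col_builder t = consensus_col_builder_alt t := by
  have hlen : PySem.Str.len ((PySem.List.pyGet? t 0).getD "") = ((pvW t : Nat) : Int) := by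
    simp [PySem.Str.len_eq, pvW]
  have hvotes :
      (t.foldl
          (fun vs col =>
            (PySem.List.pyRange 0 ((pvW t : Nat) : Int)).foldl
              (fun vs taxa =>
                vs.modify taxa.toNat
                  (fun v => v.modify ((PySem.Str.pyGet? col taxa).getD ' ') 0 (· + 1))) vs)
          (List.replicate (pvW t)
            (PySem.Dict.ofList [('A', (0 : Int)), ('T', 0), ('G', 0), ('C', 0), ('-', 0)])))
      = (List.range (pvW t)).map (fun i => pvRowDict t i) := by
    apply List.ext_getElem?
    intro i
    rw [pvOuter_getElem? (pvW t) t _ i]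
    by_cases h : i < pvW t
    · simp [h, pvRowDict, pvDict0]
    · simp [h]
  unfold consensus_col_builder consensus_col_builder_alt
  rw [hlen, Int.toNat_natCast, hvotes, PySem.List.foldl_append_singleton_eq_map, List.nil_append,
    PySem.List.pyRange_zero_natCast (pvW t), List.map_map, List.map_map]
  congr 1
  apply List.map_congr_left
  intro i _
  simp only [Function.comp]
  rw [pvSite_eq t i]
  unfold check_max_uniq pvRowDict
  simp [List.foldl_map, pvUpd, pvDict0]

-- ===== VERDICT (by name: the statement is the Claim_ definition above) =====
theorem consensus_col_builder_spec : Claim_equal_consensus_col_builder := by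
  intro t _ _
  unfold Spec_consensus_col_builder
  exact pvPorts_eq t
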